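-- pv_equiv track=rewrite | github.com/lorischl-otter/cs-sprint-challenge-hash-tables | hashtables/ex5/ex5.py | finder
-- ===== SOURCE A (Python) =====
-- def finder(files, queries):
--     """
--     Takes input of filepaths and filename queries
--     Outputs full filepaths of any filepath matching given query.
--
--     Overall runtime is O(n).
--     """
--     # Create empty dictionary
--     d = {}
--
--     # Iterate through files to store in dict
--     # key = file name, value = full file path
--     for f in files:  # O(n) over files
--         # Use "/" as split to get filename
--         filename = f.split("/")[-1]
--         # If filename not yet in d, initialize empty list
--         if filename not in d:
--             d[filename] = []
--         d[filename].append(f)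
--
--     # Generate empty list for results
--     results = []
--
--     # Iterate over queries to see which are present in dict
--     for q in queries:  # O(n) over queries
--         # If query in dict, add filepath(s) to results
--         if q in d:
--             results.extend(d[q])
--
--     return results
-- ===== SOURCE B (Python) =====
-- def finder(files, queries):
--     """Index-free version: for each query, scan files in order and
--     collect every file whose basename equals the query."""
--     results = []
--     for q in queries:
--         for f in files:
--             if f.split("/")[-1] == q:
--                 results.append(f)
--     return results
-- ===== Notes on version B (the rewrite author's own statement) =====
-- stated objective: simpler
-- what changed: Eliminates the dictionary index entirely: instead of grouping files by basename into a dict and extending results from lookups, B does a direct nested scan (per query, over files in order), which preserves per-query file order and duplicate-query repeats.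
import Mathlib
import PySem

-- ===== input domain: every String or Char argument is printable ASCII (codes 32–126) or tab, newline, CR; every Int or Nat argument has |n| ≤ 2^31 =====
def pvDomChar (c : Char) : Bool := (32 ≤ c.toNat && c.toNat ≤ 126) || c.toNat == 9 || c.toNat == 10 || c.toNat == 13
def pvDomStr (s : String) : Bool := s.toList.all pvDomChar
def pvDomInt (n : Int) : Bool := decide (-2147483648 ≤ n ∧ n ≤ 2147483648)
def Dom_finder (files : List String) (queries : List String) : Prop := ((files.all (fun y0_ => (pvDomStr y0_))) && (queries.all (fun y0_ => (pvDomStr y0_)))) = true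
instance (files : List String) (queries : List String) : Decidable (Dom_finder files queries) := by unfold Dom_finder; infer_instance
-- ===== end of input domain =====

-- B replaces A's dictionary index (group files by basename, then look queries up)
-- with a direct nested scan: per query, collect matching files in file order. Objective: simpler.

-- f.split("/")[-1]: split? is some for the nonempty separator "/", and the resulting
-- list is always nonempty, so the [-1] index never raises; the defaults are never used.
def pyBasename (f : String) : String :=
  PySem.List.pyGetD ((PySem.Str.split? f "/").getD [""]) (-1) ""

-- ===== PORT A =====
def finder (files : List String) (queries : List String) : List String :=
  -- d = {}; for f in files: filename = f.split("/")[-1]; if filename not in d: d[filename] = []; d[filename].append(f)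
  let d := files.foldl (fun d f =>
    let k := pyBasename f
    let d := if d.contains k then d else d.insert k ([] : List String)
    d.modify k [] (fun xs => xs ++ [f])) PySem.Dict.empty
  -- results = []; for q in queries: if q in d: results.extend(d[q])
  queries.foldl (fun r q => if d.contains q then r ++ d.getD q [] else r) []

-- ===== PORT B =====
def finder_alt (files : List String) (queries : List String) : List String :=
  -- results = []; for q in queries: for f in files: if f.split("/")[-1] == q: results.append(f)
  queries.foldl (fun r q =>
    files.foldl (fun r f => if pyBasename f == q then r ++ [f] else r) r) []

-- ===== PRECONDITION & SPEC =====
def Spec_finder (files : List String) (queries : List String) (out : List String) : Prop := out = finder_alt files queries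
instance (files : List String) (queries : List String) (out : List String) : Decidable (Spec_finder files queries out) := by unfold Spec_finder; infer_instance

-- ===== CLAIM (what is proved, stated in full; the proofs are below) =====
def Claim_equal_finder : Prop := ∀ (files : List String) (queries : List String), Dom_finder files queries → Spec_finder files queries (finder files queries)

-- ===== LEMMAS AND PROOFS =====

-- A's loop body equals a plain 'modify with default []' (the explicit 'if … not in d' init is absorbed).
theorem finder_step_eq (d : PySem.Dict String (List String)) (f : String) :
    (let k := pyBasename f
     let d' := if d.contains k then d else d.insert k ([] : List String)
     d'.modify k [] (fun xs => xs ++ [f])) =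
    d.modify (pyBasename f) [] (fun xs => xs ++ [f]) := by
  by_cases h : d.contains (pyBasename f) = true
  · simp [h]
  · simp only [Bool.not_eq_true] at h
    simp [h, PySem.Dict.modify, PySem.Dict.getD_of_not_contains _ _ h,
      PySem.Dict.getD_insert_self, PySem.Dict.insert_insert_self]

-- The dictionary A builds answers every lookup with the basename-filtered file list.
theorem finder_dict_getD (files : List String) (q : String) :
    (files.foldl (fun d f =>
        let k := pyBasename f
        let d := if d.contains k then d else d.insert k ([] : List String)
        d.modify k [] (fun xs => xs ++ [f])) PySem.Dict.empty).getD q [] =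
    files.filter (fun f => pyBasename f == q) := by
  have hstep : (files.foldl (fun d f =>
        let k := pyBasename f
        let d := if d.contains k then d else d.insert k ([] : List String)
        d.modify k [] (fun xs => xs ++ [f])) PySem.Dict.empty) =
      (files.map (fun f => (pyBasename f, f))).foldl
        (fun d p => d.modify p.1 [] (fun xs => xs ++ [p.2])) PySem.Dict.empty := by
    rw [List.foldl_map]
    exact PySem.List.foldl_congr_mem _ _ _ _ (fun d f _ => finder_step_eq d f)
  rw [hstep, PySem.Dict.getD_foldl_modify_append]
  simp [List.filter_map, Function.comp_def]

theorem finder_spec' (files queries : List String) :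
    finder files queries = finder_alt files queries := by
  unfold finder finder_alt
  have hB : ∀ (r : List String) (q : String),
      files.foldl (fun r f => if pyBasename f == q then r ++ [f] else r) r =
      r ++ files.filter (fun f => pyBasename f == q) := by
    intro r q
    exact PySem.List.foldl_append_if_eq_filter (fun f => pyBasename f == q) files r
  simp only [hB]
  refine PySem.List.foldl_congr_mem _ _ _ _ ?_
  intro r q _
  by_cases h : (files.foldl (fun d f =>
      let k := pyBasename f
      let d := if d.contains k then d else d.insert k ([] : List String)
      d.modify k [] (fun xs => xs ++ [f])) PySem.Dict.empty).contains q = true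
  · simp [h, finder_dict_getD]
  · simp only [Bool.not_eq_true] at h
    have h0 := PySem.Dict.getD_of_not_contains _ ([] : List String) h
    rw [finder_dict_getD] at h0
    rw [h0]
    simp [h]

-- ===== VERDICT (by name: the statement is the Claim_ definition above) =====
theorem finder_spec : Claim_equal_finder := by
  intro files queries _
  exact finder_spec' files queries
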